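-- pv_equiv track=rewrite | github.com/openrepublic/py-leap | src/leap/protocol/ds.py | symbol_code_to_uint64
-- ===== SOURCE A (Python) =====
-- def symbol_code_to_uint64(sc):
--     l = len(sc)
--     if l > 7: raise Exception("invalid symbol code {0}".format(sc))
--     result = 0
--     for i in range(l):
--         if ord(sc[i]) < ord('A') or ord(sc[i]) > ord('Z'):
--             raise Exception("invalid symbol code {0}".format(sc))
--         else:
--             result |= (int(ord(sc[i])) << (8 * (i)))
--     return result
-- ===== SOURCE B (Python) =====
-- def symbol_code_to_uint64(sc):
--     if len(sc) > 7:
--         raise Exception("invalid symbol code {0}".format(sc))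
--     for ch in sc:
--         if not ('A' <= ch <= 'Z'):
--             raise Exception("invalid symbol code {0}".format(sc))
--     return int.from_bytes(sc.encode('ascii'), 'little')
-- ===== Notes on version B (the rewrite author's own statement) =====
-- stated objective: idiomatic
-- what changed: B keeps the length/character validation but drops A's running shift-OR accumulator entirely: after a pure validation loop it packs the whole string in one step as a little-endian byte interpretation via int.from_bytes.
import Mathlib
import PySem

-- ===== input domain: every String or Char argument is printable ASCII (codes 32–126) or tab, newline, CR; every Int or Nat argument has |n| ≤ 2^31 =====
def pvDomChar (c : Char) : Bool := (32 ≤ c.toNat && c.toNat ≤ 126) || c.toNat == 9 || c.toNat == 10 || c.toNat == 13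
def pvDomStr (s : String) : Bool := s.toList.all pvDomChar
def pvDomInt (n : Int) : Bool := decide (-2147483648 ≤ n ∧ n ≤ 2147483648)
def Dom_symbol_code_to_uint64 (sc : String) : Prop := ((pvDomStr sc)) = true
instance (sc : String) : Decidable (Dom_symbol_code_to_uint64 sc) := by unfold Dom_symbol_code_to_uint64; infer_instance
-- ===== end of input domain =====

-- B drops A's running shift-OR accumulator: a pure validation loop, then one closed-form
-- little-endian byte interpretation (int.from_bytes); same value wherever A returns.

-- ===== PORT A =====
-- literal port of A: length check, then an indexed loop OR-ing ord(sc[i]) << 8*i into result.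
-- (the 'raise' branches and the unreachable none case return the running result; Pre_ excludes them)
def symbol_code_to_uint64 (sc : String) : Int :=
  let l : Int := PySem.Str.len sc
  if l > 7 then 0
  else
    (PySem.List.pyRange 0 l 1).foldl (fun result i =>
      match PySem.Str.pyGet? sc i with
      | some c =>
          if c.toNat < 65 ∨ c.toNat > 90 then result
          else PySem.Int.bor result ((c.toNat : Int) <<< (8 * i).toNat)
      | none => result) 0

-- ===== PORT B =====
-- port of B: validation (length, then all chars A..Z), then int.from_bytes(sc, 'little')
-- rendered as the little-endian byte fold over the character codes.
def symbol_code_to_uint64_alt (sc : String) : Int :=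
  if sc.toList.length > 7 then 0
  else if sc.toList.all (fun c => decide (65 ≤ c.toNat ∧ c.toNat ≤ 90)) then
    ((sc.toList.foldr (fun c acc => acc * 256 + c.toNat) 0 : Nat) : Int)
  else 0

-- ===== PRECONDITION & SPEC =====
-- Pre_: exactly the inputs where Python A returns (len ≤ 7, every char in 'A'..'Z'); elsewhere A raises.
def Pre_symbol_code_to_uint64 (sc : String) : Prop :=
  sc.toList.length ≤ 7 ∧ (sc.toList.all fun c => 65 ≤ c.toNat && c.toNat ≤ 90) = true
instance (sc : String) : Decidable (Pre_symbol_code_to_uint64 sc) := by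
  unfold Pre_symbol_code_to_uint64; infer_instance
def pvWitness_symbol_code_to_uint64 : String := "EOS"
def Spec_symbol_code_to_uint64 (sc : String) (out : Int) : Prop := out = symbol_code_to_uint64_alt sc
instance (sc : String) (out : Int) : Decidable (Spec_symbol_code_to_uint64 sc out) := by unfold Spec_symbol_code_to_uint64; infer_instance

-- ===== CLAIM (what is proved, stated in full; the proofs are below) =====
def Claim_equal_symbol_code_to_uint64 : Prop := ∀ (sc : String), Dom_symbol_code_to_uint64 sc → Pre_symbol_code_to_uint64 sc → Spec_symbol_code_to_uint64 sc (symbol_code_to_uint64 sc)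

-- ===== LEMMAS AND PROOFS =====

-- the little-endian pack of B (foldr form of int.from_bytes little)
def pvPack (cs : List Char) : Nat := cs.foldr (fun c acc => acc * 256 + c.toNat) 0

-- bits of r live below position k, bits of b <<< k at or above it: OR is addition
theorem pv_lor_shift (k : Nat) : ∀ r b : Nat, r < 2 ^ k → r ||| (b <<< k) = r + b * 2 ^ k := by
  induction k with
  | zero => intro r b h; interval_cases r; simp [Nat.shiftLeft_eq]
  | succ k ih =>
      intro r b h
      have hbit : b <<< (k+1) = Nat.bit false (b <<< k) := by
        simp [Nat.bit, Nat.shiftLeft_eq, pow_succ]; ring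
      have hr : Nat.bit (r.testBit 0) (r >>> 1) = r := Nat.bit_testBit_zero_shiftRight_one r
      have h2 : r >>> 1 = r / 2 := Nat.shiftRight_one r
      have hlt : r / 2 < 2 ^ k := by
        have := h; rw [pow_succ] at this; omega
      calc r ||| (b <<< (k+1))
          = Nat.bit (r.testBit 0) (r >>> 1) ||| Nat.bit false (b <<< k) := by rw [hr, hbit]
        _ = Nat.bit (r.testBit 0 || false) ((r >>> 1) ||| (b <<< k)) := Nat.lor_bit _ _ _ _
        _ = r + b * 2 ^ (k+1) := by
            rw [h2, ih (r/2) b hlt]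
            have hnl : b * (2 ^ k * 2) = 2 * (b * 2 ^ k) := by ring
            by_cases hpar : r % 2 = 1 <;>
              simp [Nat.bit, Nat.testBit_zero, hpar, pow_succ] <;> omega

-- A's loop from index a with accumulator r (bits below 8a) equals r + pack(drop a) * 2^(8a)
theorem pv_loop_eq (t : List Char) (hall : ∀ c ∈ t, 65 ≤ c.toNat ∧ c.toNat ≤ 90) :
    ∀ n a r : Nat, t.length - a = n → a ≤ t.length → r < 2 ^ (8 * a) →
    (PySem.List.pyRange (a : Int) (t.length : Int) 1).foldl (fun result i =>
      match PySem.List.pyGet? t i with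
      | some c =>
          if c.toNat < 65 ∨ c.toNat > 90 then result
          else PySem.Int.bor result ((c.toNat : Int) <<< (8 * i).toNat)
      | none => result) (r : Int)
    = ((r + pvPack (t.drop a) * 2 ^ (8 * a) : Nat) : Int) := by
  intro n
  induction n with
  | zero =>
      intro a r hn ha hr
      have hea : a = t.length := by omega
      rw [PySem.List.pyRange_one_eq_nil (by exact_mod_cast le_of_eq hea.symm)]
      simp [hea, pvPack]
  | succ n ih =>
      intro a r hn ha hr
      have hlt : a < t.length := by omega
      rw [PySem.List.pyRange_one_cons (by exact_mod_cast hlt)]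
      simp only [List.foldl_cons]
      have hget : PySem.List.pyGet? t (a : Int) = some t[a] := by
        simp [PySem.List.pyGet?_natCast, List.getElem?_eq_getElem hlt]
      rw [hget]
      have hc := hall t[a] (List.getElem_mem hlt)
      have hif : ¬ (t[a].toNat < 65 ∨ t[a].toNat > 90) := by omega
      simp only [hif, if_false]
      have hsh : (8 * (a : Int)).toNat = 8 * a := by omega
      have hcast : ((t[a].toNat : Int) <<< (8 * a)) = ((t[a].toNat <<< (8 * a) : Nat) : Int) := by
        simp
      have hbor : PySem.Int.bor (r : Int) ((t[a].toNat : Int) <<< (8 * (a : Int)).toNat)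
          = ((r + t[a].toNat * 2 ^ (8 * a) : Nat) : Int) := by
        rw [hsh, hcast, PySem.Int.bor_natCast, pv_lor_shift _ _ _ hr]
      rw [hbor]
      have hr' : r + t[a].toNat * 2 ^ (8 * a) < 2 ^ (8 * (a + 1)) := by
        have h1 : t[a].toNat * 2 ^ (8 * a) ≤ 255 * 2 ^ (8 * a) :=
          Nat.mul_le_mul_right _ (by omega)
        have h2 : 2 ^ (8 * (a + 1)) = 256 * 2 ^ (8 * a) := by
          rw [show 8 * (a + 1) = 8 * a + 8 by ring, pow_add]; ring
        omega
      have hstep := ih (a + 1) (r + t[a].toNat * 2 ^ (8 * a)) (by omega) (by omega) hr'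
      have hrange : ((a : Int) + 1) = ((a + 1 : Nat) : Int) := by push_cast; ring
      rw [hrange, hstep]
      have hdrop : t.drop a = t[a] :: t.drop (a + 1) := List.drop_eq_getElem_cons hlt
      have hpk : pvPack (t.drop a) = pvPack (t.drop (a + 1)) * 256 + t[a].toNat := by
        rw [pvPack, pvPack, hdrop]; rfl
      rw [hpk]
      congr 1
      have h2 : 2 ^ (8 * (a + 1)) = 2 ^ (8 * a) * 256 := by
        rw [show 8 * (a + 1) = 8 * a + 8 by ring, pow_add]; ring
      rw [h2]; ring

-- ===== VERDICT (by name: the statement is the Claim_ definition above) =====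
theorem symbol_code_to_uint64_spec : Claim_equal_symbol_code_to_uint64 := by
  unfold Claim_equal_symbol_code_to_uint64
  intro sc _hdom hpre
  obtain ⟨hlen, hallb0⟩ := hpre
  have hall : ∀ c ∈ sc.toList, 65 ≤ c.toNat ∧ c.toNat ≤ 90 := by
    intro c hc; have := List.all_eq_true.mp hallb0 c hc; simpa using this
  unfold Spec_symbol_code_to_uint64 symbol_code_to_uint64 symbol_code_to_uint64_alt
  have hlenI : PySem.Str.len sc = (sc.toList.length : Int) := PySem.Str.len_eq sc
  have hnot : ¬ (PySem.Str.len sc > 7) := by rw [hlenI]; exact_mod_cast by omega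
  have hnot2 : ¬ (sc.toList.length > 7) := by omega
  have hallb : sc.toList.all (fun c => decide (65 ≤ c.toNat ∧ c.toNat ≤ 90)) = true := by
    simp only [List.all_eq_true, decide_eq_true_eq]; exact hall
  rw [if_neg hnot, if_neg hnot2, if_pos hallb, hlenI]
  have hbody : (fun (result : Int) (i : Int) =>
      match PySem.Str.pyGet? sc i with
      | some c =>
          if c.toNat < 65 ∨ c.toNat > 90 then result
          else PySem.Int.bor result ((c.toNat : Int) <<< (8 * i).toNat)
      | none => result)
      = (fun (result : Int) (i : Int) =>
      match PySem.List.pyGet? sc.toList i with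
      | some c =>
          if c.toNat < 65 ∨ c.toNat > 90 then result
          else PySem.Int.bor result ((c.toNat : Int) <<< (8 * i).toNat)
      | none => result) := rfl
  have h0 := pv_loop_eq sc.toList hall sc.toList.length 0 0 (by omega) (by omega) (by norm_num)
  simp only [Nat.cast_zero] at h0
  rw [hbody, h0]
  simp [pvPack]
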